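-- pv_equiv track=rewrite | github.com/lissity/AoC | 2016/Day07/main.py | check_TLS_support
-- ===== SOURCE A (Python) =====
-- def check_TLS_support(letter_seq):
--     abba_inside = False
--     abba_outside = False
--     inside_square_bracket = False
--     for i in range(0, len(letter_seq)-3):
--         if(letter_seq[i] == '['):
--             inside_square_bracket = True
--         elif (letter_seq[i] == ']'):
--             inside_square_bracket = False
--         elif (letter_seq[i].isalpha() and letter_seq[i+1].isalpha() and
--               letter_seq[i+2].isalpha() and letter_seq[i+3].isalpha()):
--             let_1 = letter_seq[i]
--             let_2 = letter_seq[i+1]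
--             let_3 = letter_seq[i+2]
--             let_4 = letter_seq[i+3]
--             if(let_1 == let_2):
--                 pass
--             elif((let_1+let_2) == (let_4+let_3)): # ABBA found
--                 if (inside_square_bracket):
--                     abba_inside = True
--                 else:
--                     abba_outside = True
--     return (abba_outside and not abba_inside)
-- ===== SOURCE B (Python) =====
-- def check_TLS_support(letter_seq):
--     # Parse into (text, is_inside) segments by toggling on '[' / ']', then scan each segment.
--     segments = []
--     cur = []
--     inside = False
--     for ch in letter_seq:
--         if ch == '[':
--             segments.append((''.join(cur), inside))
--             cur = []
--             inside = True
--         elif ch == ']':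
--             segments.append((''.join(cur), inside))
--             cur = []
--             inside = False
--         else:
--             cur.append(ch)
--     segments.append((''.join(cur), inside))
--     abba_inside = False
--     abba_outside = False
--     for text, flag in segments:
--         for i in range(len(text) - 3):
--             a, b, c, d = text[i], text[i+1], text[i+2], text[i+3]
--             if (a.isalpha() and b.isalpha() and c.isalpha() and d.isalpha()
--                     and a == d and b == c and a != b):
--                 if flag:
--                     abba_inside = True
--                 else:
--                     abba_outside = True
--     return (abba_outside and not abba_inside)
-- ===== Notes on version B (the rewrite author's own statement) =====
-- stated objective: alternative
-- what changed: B first splits the string into (text, is_inside) segments by toggling an inside flag at the square-bracket characters, then runs the 4-char ABBA window scan separately over each segment, instead of A's single index loop that interleaves bracket toggling with window checks.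
import Mathlib
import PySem

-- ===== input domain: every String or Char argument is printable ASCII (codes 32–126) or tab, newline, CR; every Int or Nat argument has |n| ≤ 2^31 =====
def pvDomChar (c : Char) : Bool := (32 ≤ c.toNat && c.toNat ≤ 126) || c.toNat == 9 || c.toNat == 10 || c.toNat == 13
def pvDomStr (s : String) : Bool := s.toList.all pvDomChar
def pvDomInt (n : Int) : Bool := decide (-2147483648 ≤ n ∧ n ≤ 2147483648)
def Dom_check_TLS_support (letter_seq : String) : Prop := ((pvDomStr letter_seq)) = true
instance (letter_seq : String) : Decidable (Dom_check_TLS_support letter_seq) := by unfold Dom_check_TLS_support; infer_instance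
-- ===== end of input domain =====

-- B re-implements A by a different decomposition: one pass splits the IP into (text, is_inside)
-- segments at '['/']', then a 4-char window scan per segment; A interleaves bracket toggling and
-- window checks in a single index loop. Proved to return the same value on every input.


-- ===== PORT A =====
-- A's loop 'for i in range(0, len-3)' reading letter_seq[i..i+3], as the obvious structural
-- recursion peeking at the next four characters; state = (abba_inside, abba_outside, inside_square_bracket).
def pvALoop : List Char → Bool → Bool → Bool → Bool × Bool × Bool
  | c1 :: c2 :: c3 :: c4 :: rest, ain, aout, insq =>
    if c1 = '[' then pvALoop (c2 :: c3 :: c4 :: rest) ain aout true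
    else if c1 = ']' then pvALoop (c2 :: c3 :: c4 :: rest) ain aout false
    else if PySem.Chars.isalpha c1 && PySem.Chars.isalpha c2 &&
            PySem.Chars.isalpha c3 && PySem.Chars.isalpha c4 then
      if c1 = c2 then pvALoop (c2 :: c3 :: c4 :: rest) ain aout insq
      -- (let_1+let_2) == (let_4+let_3): the concatenations compared, as List Char
      else if ([c1] ++ [c2] : List Char) = [c4] ++ [c3] then
        if insq then pvALoop (c2 :: c3 :: c4 :: rest) true aout insq
        else pvALoop (c2 :: c3 :: c4 :: rest) ain true insq
      else pvALoop (c2 :: c3 :: c4 :: rest) ain aout insq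
    else pvALoop (c2 :: c3 :: c4 :: rest) ain aout insq
  | _, ain, aout, insq => (ain, aout, insq)

def check_TLS_support (letter_seq : String) : Bool :=
  let r := pvALoop letter_seq.toList false false false
  r.2.1 && !r.1

-- ===== PORT B =====
-- Source B's first loop: split into (text, is_inside) segments, toggling on '[' / ']'.
def pvSegs : List Char → List Char → Bool → List (List Char × Bool)
  | [], cur, inside => [(cur, inside)]
  | ch :: rest, cur, inside =>
    if ch = '[' then (cur, inside) :: pvSegs rest [] true
    else if ch = ']' then (cur, inside) :: pvSegs rest [] false
    else pvSegs rest (cur ++ [ch]) inside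

-- Source B's inner window loop 'for i in range(len(text) - 3)' over one segment's text.
def pvScanText : List Char → Bool → Bool × Bool → Bool × Bool
  | c1 :: c2 :: c3 :: c4 :: rest, flag, st =>
    let st' :=
      if PySem.Chars.isalpha c1 = true ∧ PySem.Chars.isalpha c2 = true ∧
         PySem.Chars.isalpha c3 = true ∧ PySem.Chars.isalpha c4 = true ∧
         c1 = c4 ∧ c2 = c3 ∧ c1 ≠ c2 then
        (if flag then (true, st.2) else (st.1, true))
      else st
    pvScanText (c2 :: c3 :: c4 :: rest) flag st'
  | _, _, st => st

-- Source B's outer loop over the segment list; state = (abba_inside, abba_outside).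
def pvFoldScan : List (List Char × Bool) → Bool × Bool → Bool × Bool
  | [], st => st
  | (t, f) :: segs, st => pvFoldScan segs (pvScanText t f st)

def check_TLS_support_alt (letter_seq : String) : Bool :=
  let st := pvFoldScan (pvSegs letter_seq.toList [] false) (false, false)
  st.2 && !st.1

-- ===== PRECONDITION & SPEC =====
def Spec_check_TLS_support (letter_seq : String) (out : Bool) : Prop := out = check_TLS_support_alt letter_seq
instance (letter_seq : String) (out : Bool) : Decidable (Spec_check_TLS_support letter_seq out) := by unfold Spec_check_TLS_support; infer_instance

-- ===== CLAIM (what is proved, stated in full; the proofs are below) =====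
def Claim_equal_check_TLS_support : Prop := ∀ (letter_seq : String), Dom_check_TLS_support letter_seq → Spec_check_TLS_support letter_seq (check_TLS_support letter_seq)

-- ===== LEMMAS AND PROOFS =====

def pvIsBr (c : Char) : Bool := c = '[' || c = ']'

theorem pvBr_not_alpha (b : Char) (hb : pvIsBr b = true) : PySem.Chars.isalpha b = false := by
  simp only [pvIsBr, Bool.or_eq_true, decide_eq_true_eq] at hb
  rcases hb with rfl | rfl <;> decide

-- a window scan over fewer than four characters does nothing
theorem pvScanText_short (t : List Char) (f : Bool) (st : Bool × Bool)
    (h : t.length < 4) : pvScanText t f st = st := by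
  match t with
  | [] => rfl
  | [_] => rfl
  | [_, _] => rfl
  | [_, _, _] => rfl
  | _ :: _ :: _ :: _ :: _ => simp at h; omega

-- segments built from fewer than four characters (incl. the pending prefix) are all too short to scan
theorem pvFoldScan_small (l : List Char) (cur : List Char) (f : Bool) (st : Bool × Bool)
    (h : cur.length + l.length < 4) : pvFoldScan (pvSegs l cur f) st = st := by
  induction l generalizing cur f st with
  | nil => simp [pvSegs, pvFoldScan, pvScanText_short cur f st (by simpa using h)]
  | cons ch rest ih =>
    simp only [pvSegs]
    split
    · simp only [pvFoldScan, pvScanText_short cur f st (by simp at h; omega)]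
      exact ih [] true st (by simp at h ⊢; omega)
    · split
      · simp only [pvFoldScan, pvScanText_short cur f st (by simp at h; omega)]
        exact ih [] false st (by simp at h ⊢; omega)
      · exact ih (cur ++ [ch]) f st (by simp at h ⊢; omega)

-- a bracket-free run extends the pending segment
theorem pvSegs_noBr (s : List Char) (cur : List Char) (f : Bool)
    (hs : ∀ c ∈ s, pvIsBr c = false) : pvSegs s cur f = [(cur ++ s, f)] := by
  induction s generalizing cur with
  | nil => simp [pvSegs]
  | cons c s' ih =>
    have hc := hs c (by simp)
    simp only [pvIsBr, Bool.or_eq_false_iff, decide_eq_false_iff_not] at hc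
    simp only [pvSegs, if_neg hc.1, if_neg hc.2]
    rw [ih (cur ++ [c]) (fun x hx => hs x (by simp [hx]))]
    simp

-- a bracket closes the pending segment and toggles the flag
theorem pvSegs_split (s : List Char) (b : Char) (rest : List Char) (cur : List Char) (f : Bool)
    (hs : ∀ c ∈ s, pvIsBr c = false) (hb : pvIsBr b = true) :
    pvSegs (s ++ b :: rest) cur f =
      (cur ++ s, f) :: pvSegs rest [] (if b = '[' then true else false) := by
  induction s generalizing cur with
  | nil =>
    simp only [pvIsBr, Bool.or_eq_true, decide_eq_true_eq] at hb
    rcases hb with hb | hb <;> simp [pvSegs, hb]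
  | cons c s' ih =>
    have hc := hs c (by simp)
    simp only [pvIsBr, Bool.or_eq_false_iff, decide_eq_false_iff_not] at hc
    simp only [List.cons_append, pvSegs, if_neg hc.1, if_neg hc.2]
    rw [ih (cur ++ [c]) (fun x hx => hs x (by simp [hx]))]
    simp

-- one window of the scan, split off the front
theorem pvScanText_cons (c1 c2 c3 c4 : Char) (r : List Char) (f : Bool) (st : Bool × Bool) :
    pvScanText (c1 :: c2 :: c3 :: c4 :: r) f st
      = pvScanText (c2 :: c3 :: c4 :: r) f (pvScanText [c1, c2, c3, c4] f st) := rfl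

-- one non-bracket step of A's loop updates the state exactly like B's single-window scan
theorem pvALoop_step (c1 c2 c3 c4 : Char) (rest : List Char) (ain aout insq : Bool)
    (h1 : ¬ c1 = '[') (h2 : ¬ c1 = ']') :
    pvALoop (c1 :: c2 :: c3 :: c4 :: rest) ain aout insq =
      pvALoop (c2 :: c3 :: c4 :: rest)
        (pvScanText [c1, c2, c3, c4] insq (ain, aout)).1
        (pvScanText [c1, c2, c3, c4] insq (ain, aout)).2 insq := by
  rw [pvALoop]
  rw [if_neg h1, if_neg h2]
  simp only [pvScanText]
  by_cases hP : PySem.Chars.isalpha c1 = true ∧ PySem.Chars.isalpha c2 = true ∧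
      PySem.Chars.isalpha c3 = true ∧ PySem.Chars.isalpha c4 = true ∧
      c1 = c4 ∧ c2 = c3 ∧ c1 ≠ c2
  · obtain ⟨a1, a2, a3, a4, e14, e23, hne⟩ := hP
    have hP' : PySem.Chars.isalpha c1 = true ∧ PySem.Chars.isalpha c2 = true ∧
        PySem.Chars.isalpha c3 = true ∧ PySem.Chars.isalpha c4 = true ∧
        c1 = c4 ∧ c2 = c3 ∧ c1 ≠ c2 := ⟨a1, a2, a3, a4, e14, e23, hne⟩
    rw [if_pos hP']
    have hball : (PySem.Chars.isalpha c1 && PySem.Chars.isalpha c2 &&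
        PySem.Chars.isalpha c3 && PySem.Chars.isalpha c4) = true := by
      simp [a1, a2, a3, a4]
    rw [if_pos hball, if_neg (show ¬ c1 = c2 from hne),
        if_pos (show ([c1] ++ [c2] : List Char) = [c4] ++ [c3] by simp [e14, e23])]
    cases insq <;> rfl
  · rw [if_neg hP]
    by_cases halpha : (PySem.Chars.isalpha c1 && PySem.Chars.isalpha c2 &&
        PySem.Chars.isalpha c3 && PySem.Chars.isalpha c4) = true
    · rw [if_pos halpha]
      simp only [Bool.and_eq_true] at halpha
      obtain ⟨⟨⟨a1, a2⟩, a3⟩, a4⟩ := halpha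
      by_cases h12 : c1 = c2
      · rw [if_pos h12]
      · rw [if_neg h12]
        have hlist : ¬ (([c1] ++ [c2] : List Char) = [c4] ++ [c3]) := by
          intro h
          simp only [List.singleton_append, List.cons.injEq, and_true] at h
          exact hP ⟨a1, a2, a3, a4, h.1, h.2, h12⟩
        rw [if_neg hlist]
    · rw [if_neg halpha]

-- A's loop over a bracket-free run (ending the string or followed by a bracket)
-- is exactly B's window scan of that run
theorem pvALoop_prefix (s t : List Char) (ain aout insq : Bool)
    (hs : ∀ c ∈ s, pvIsBr c = false)
    (ht : t = [] ∨ ∃ b rest, t = b :: rest ∧ pvIsBr b = true) :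
    pvALoop (s ++ t) ain aout insq =
      pvALoop t (pvScanText s insq (ain, aout)).1 (pvScanText s insq (ain, aout)).2 insq := by
  revert hs
  induction s generalizing ain aout with
  | nil => intro _; rfl
  | cons c s' ih =>
    intro hs
    have hc := hs c (by simp)
    simp only [pvIsBr, Bool.or_eq_false_iff, decide_eq_false_iff_not] at hc
    have hs' : ∀ x ∈ s', pvIsBr x = false := fun x hx => hs x (by simp [hx])
    rcases s' with _ | ⟨c2, s''⟩
    · rcases ht with rfl | ⟨b, rest, rfl, hb⟩
      · rfl
      · rcases rest with _ | ⟨r1, rest'⟩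
        · rfl
        · rcases rest' with _ | ⟨r2, rest''⟩
          · rfl
          · have hba := pvBr_not_alpha b hb
            simp only [List.cons_append, List.nil_append]
            rw [pvALoop, if_neg hc.1, if_neg hc.2, if_neg (by simp [hba])]
            rfl
    · rcases s'' with _ | ⟨c3, s'''⟩
      · rcases ht with rfl | ⟨b, rest, rfl, hb⟩
        · rfl
        · rcases rest with _ | ⟨r1, rest'⟩
          · rfl
          · have hba := pvBr_not_alpha b hb
            simp only [List.cons_append, List.nil_append]
            rw [pvALoop, if_neg hc.1, if_neg hc.2, if_neg (by simp [hba])]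
            exact ih ain aout hs'
      · rcases s''' with _ | ⟨c4, s4⟩
        · rcases ht with rfl | ⟨b, rest, rfl, hb⟩
          · rfl
          · have hba := pvBr_not_alpha b hb
            simp only [List.cons_append, List.nil_append]
            rw [pvALoop, if_neg hc.1, if_neg hc.2, if_neg (by simp [hba])]
            exact ih ain aout hs'
        · simp only [List.cons_append]
          rw [pvALoop_step c c2 c3 c4 (s4 ++ t) ain aout insq hc.1 hc.2]
          rw [pvScanText_cons]
          exact ih _ _ hs'

-- main correspondence: A's loop state equals B's fold over the segments (length-bounded induction)
theorem pvMainAux : ∀ (n : Nat) (l : List Char), l.length ≤ n → ∀ (ain aout insq : Bool),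
    ((pvALoop l ain aout insq).1, (pvALoop l ain aout insq).2.1)
      = pvFoldScan (pvSegs l [] insq) (ain, aout) := by
  intro n
  induction n with
  | zero =>
    intro l hl ain aout insq
    have hnil : l = [] := List.eq_nil_of_length_eq_zero (Nat.le_zero.mp hl)
    subst hnil
    rfl
  | succ n ihn =>
    intro l hl ain aout insq
    obtain ⟨s, hsdef⟩ : ∃ s, s = l.takeWhile (fun c => !pvIsBr c) := ⟨_, rfl⟩
    obtain ⟨d, hddef⟩ : ∃ d, d = l.dropWhile (fun c => !pvIsBr c) := ⟨_, rfl⟩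
    have hst : s ++ d = l := by rw [hsdef, hddef]; exact List.takeWhile_append_dropWhile
    have hsBr : ∀ c ∈ s, pvIsBr c = false := by
      intro c hc
      rw [hsdef] at hc
      have := List.mem_takeWhile_imp hc
      simpa using this
    cases hdw : d with
    | nil =>
      have hl2 : l = s := by rw [← hst, hdw, List.append_nil]
      rw [hl2]
      have hpre := pvALoop_prefix s [] ain aout insq hsBr (Or.inl rfl)
      rw [List.append_nil] at hpre
      rw [hpre]
      rw [pvSegs_noBr s [] insq hsBr]
      simp only [pvFoldScan, List.nil_append]
      simp [pvALoop]
    | cons b rest =>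
      have hb : pvIsBr b = true := by
        have he : l.dropWhile (fun c => !pvIsBr c) = b :: rest := by rw [← hddef]; exact hdw
        have h1 : l.dropWhile (fun c => !pvIsBr c) ≠ [] := by rw [he]; simp
        have h2 := List.head_dropWhile_not (l := l) (p := fun c => !pvIsBr c) h1
        simp only [he, List.head_cons] at h2
        simpa using h2
      have hl2 : l = s ++ b :: rest := by rw [← hst, hdw]
      have hlen : rest.length ≤ n := by
        have : (s ++ b :: rest).length = l.length := by rw [← hl2]
        simp only [List.length_append, List.length_cons] at this
        omega
      subst hl2
      rw [pvALoop_prefix s (b :: rest) ain aout insq hsBr (Or.inr ⟨b, rest, rfl, hb⟩)]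
      rw [pvSegs_split s b rest [] insq hsBr hb]
      simp only [pvFoldScan, List.nil_append]
      have hbcases : b = '[' ∨ b = ']' := by simpa [pvIsBr] using hb
      rcases rest with _ | ⟨r1, _ | ⟨r2, _ | ⟨r3, rest'⟩⟩⟩
      · rw [pvFoldScan_small _ [] _ _ (by simp)]; simp [pvALoop]
      · rw [pvFoldScan_small _ [] _ _ (by simp)]; simp [pvALoop]
      · rw [pvFoldScan_small _ [] _ _ (by simp)]; simp [pvALoop]
      · rcases hbcases with rfl | rfl
        · rw [pvALoop, if_pos rfl]
          have := ihn (r1 :: r2 :: r3 :: rest')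
            (by simpa using hlen)
            (pvScanText s insq (ain, aout)).1
            (pvScanText s insq (ain, aout)).2 true
          simpa using this
        · rw [pvALoop, if_neg (by decide), if_pos rfl]
          have := ihn (r1 :: r2 :: r3 :: rest')
            (by simpa using hlen)
            (pvScanText s insq (ain, aout)).1
            (pvScanText s insq (ain, aout)).2 false
          simpa using this

-- ===== VERDICT (by name: the statement is the Claim_ definition above) =====
theorem check_TLS_support_spec : Claim_equal_check_TLS_support := by
  intro s _
  unfold Spec_check_TLS_support check_TLS_support check_TLS_support_alt
  have h := pvMainAux s.toList.length s.toList le_rfl false false false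
  have h1 : (pvALoop s.toList false false false).1
      = (pvFoldScan (pvSegs s.toList [] false) (false, false)).1 := by rw [← h]
  have h2 : (pvALoop s.toList false false false).2.1
      = (pvFoldScan (pvSegs s.toList [] false) (false, false)).2 := by rw [← h]
  simp only [h1, h2]
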